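-- pv_equiv track=rewrite | github.com/matejlecnik/b9-dashboard | api/services/categorization_service_tags.py | _determine_primary_category
-- ===== SOURCE A (Python) =====
-- from typing import List, Dict, Optional, Any, Tuple
--
-- def _determine_primary_category(tags: List[str]) -> str:
--     """Determine primary category from tags"""
--     if not tags:
--         return "niche"
--
--     # Priority order for primary category
--     priority_order = ["niche", "focus", "body", "ethnicity", "age", "style", "ass", "breasts", "special", "hair", "content"]
--
--     # Get categories from tags
--     tag_categories = []
--     for tag in tags:
--         if ':' in tag:
--             category = tag.split(':')[0]
--             tag_categories.append(category)
--
--     # Return first category based on priority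
--     for priority_cat in priority_order:
--         if priority_cat in tag_categories:
--             return priority_cat
--
--     # Fallback to first category found
--     return tag_categories[0] if tag_categories else "niche"
-- ===== SOURCE B (Python) =====
-- def _determine_primary_category(tags):
--     """Determine primary category from tags (single-pass min-priority-index form)"""
--     if not tags:
--         return "niche"
--
--     priority_order = ["niche", "focus", "body", "ethnicity", "age", "style", "ass", "breasts", "special", "hair", "content"]
--     prio_index = {cat: i for i, cat in enumerate(priority_order)}
--
--     first = None           # first category prefix seen (fallback)
--     best = None            # (priority index, category) with minimal index so far
--     for tag in tags:
--         if ':' in tag: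
--             cat = tag.split(':')[0]
--             if first is None:
--                 first = cat
--             i = prio_index.get(cat)
--             if i is not None and (best is None or i < best[0]):
--                 best = (i, cat)
--
--     if best is not None:
--         return best[1]
--     return first if first is not None else "niche"
-- ===== Notes on version B (the rewrite author's own statement) =====
-- stated objective: alternative
-- what changed: Replaces the two-phase form (build the full category list, then scan the 11-entry priority list with a linear 'in' membership test per entry) by a single pass over tags that tracks the first prefix seen and the minimum priority index via a dict built once from priority_order.
import Mathlib
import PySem

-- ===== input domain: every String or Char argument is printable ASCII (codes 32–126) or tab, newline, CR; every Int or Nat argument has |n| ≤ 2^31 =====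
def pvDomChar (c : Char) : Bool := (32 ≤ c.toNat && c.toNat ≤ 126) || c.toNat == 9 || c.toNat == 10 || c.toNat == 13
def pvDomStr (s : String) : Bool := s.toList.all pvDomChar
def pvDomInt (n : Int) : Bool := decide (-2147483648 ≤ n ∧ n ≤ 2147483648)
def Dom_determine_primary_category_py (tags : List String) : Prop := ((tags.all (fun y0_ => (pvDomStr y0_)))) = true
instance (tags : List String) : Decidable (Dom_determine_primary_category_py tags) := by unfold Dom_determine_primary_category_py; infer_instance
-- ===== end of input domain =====

-- B replaces A's two-phase scan (collect all category prefixes, then test each of the 11 priority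
-- categories for list membership) by a single pass over tags tracking the first prefix seen and the
-- minimum priority index looked up in a dict built once from priority_order (alternative decomposition).


-- ===== PORT A =====
def pvPrio : List String :=
  ["niche", "focus", "body", "ethnicity", "age", "style", "ass", "breasts", "special", "hair", "content"]

-- tag.split(':')[0]; split? with a nonempty separator always returns some nonempty list, so the
-- catch-all "" branch is unreachable (the [0] indexing never raises in Python either).
def pvPrefix (tag : String) : String :=
  match PySem.Str.split? tag ":" with
  | some (c :: _) => c
  | _ => ""

-- the loop 'for priority_cat in priority_order: if priority_cat in tag_categories: return priority_cat'
def pvFindPrio : List String → List String → Option String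
  | [], _ => none
  | p :: rest, cats => if cats.contains p then some p else pvFindPrio rest cats

def determine_primary_category_py (tags : List String) : String :=
  if tags = [] then "niche"
  else
    let tag_categories :=
      tags.foldl (fun acc tag => if PySem.Str.isIn ":" tag then acc ++ [pvPrefix tag] else acc) []
    match pvFindPrio pvPrio tag_categories with
    | some p => p
    | none => match tag_categories with
              | [] => "niche"
              | c :: _ => c

-- ===== PORT B =====
-- prio_index = {cat: i for i, cat in enumerate(priority_order)}
def pvPrioIndex : PySem.Dict String Int :=
  (PySem.List.enumerate pvPrio 0).foldl (fun d p => d.insert p.2 p.1) PySem.Dict.empty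

def determine_primary_category_py_alt (tags : List String) : String :=
  if tags = [] then "niche"
  else
    let st := tags.foldl
      (fun (st : Option String × Option (Int × String)) tag =>
        if PySem.Str.isIn ":" tag then
          let cat := pvPrefix tag
          let first := match st.1 with | none => some cat | some f => some f
          let best :=
            match pvPrioIndex.get? cat with
            | some i =>
                match st.2 with
                | none => some (i, cat)
                | some b => if i < b.1 then some (i, cat) else some b
            | none => st.2
          (first, best)
        else st)
      (none, none)
    match st.2 with
    | some b => b.2
    | none => match st.1 with
              | some f => f
              | none => "niche"

-- ===== PRECONDITION & SPEC =====
def Spec_determine_primary_category_py (tags : List String) (out : String) : Prop := out = determine_primary_category_py_alt tags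
instance (tags : List String) (out : String) : Decidable (Spec_determine_primary_category_py tags out) := by unfold Spec_determine_primary_category_py; infer_instance

-- ===== CLAIM (what is proved, stated in full; the proofs are below) =====
def Claim_equal_determine_primary_category_py : Prop := ∀ (tags : List String), Dom_determine_primary_category_py tags → Spec_determine_primary_category_py tags (determine_primary_category_py tags)

-- ===== LEMMAS AND PROOFS =====

-- the list of category prefixes both programs traverse
def pvCats (tags : List String) : List String :=
  (tags.filter (fun t => PySem.Str.isIn ":" t)).map pvPrefix

-- B's per-category state transformer
def pvStep (st : Option String × Option (Int × String)) (cat : String) :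
    Option String × Option (Int × String) :=
  (st.1.or (some cat),
   match pvPrioIndex.get? cat with
   | some i =>
       match st.2 with
       | none => some (i, cat)
       | some b => if i < b.1 then some (i, cat) else some b
   | none => st.2)

-- minimum (index, category) with left bias
def pvOptMin : Option (Int × String) → Option (Int × String) → Option (Int × String)
  | none, b => b
  | some a, none => some a
  | some a, some b => if b.1 < a.1 then some b else some a

-- first index of a string in a list, as Option Int
def pvIdx : List String → String → Option Int
  | [], _ => none
  | p :: rest, c => if p == c then some 0 else (pvIdx rest c).map (· + 1)

-- minimum (index in P, category) over a category list, left-biased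
def pvMinOverP (P : List String) : List String → Option (Int × String)
  | [] => none
  | c :: cs => pvOptMin ((pvIdx P c).map (fun i => (i, c))) (pvMinOverP P cs)

set_option maxHeartbeats 2000000 in
theorem pvPrioIndex_eq :
    pvPrioIndex = PySem.Dict.mk [("niche",0),("focus",1),("body",2),("ethnicity",3),("age",4),("style",5),("ass",6),("breasts",7),("special",8),("hair",9),("content",10)] := by
  decide

set_option maxHeartbeats 2000000 in
theorem pvPrioIndex_get? (c : String) :
    pvPrioIndex.get? c = pvIdx pvPrio c := by
  have hempty : (PySem.Dict.mk ([] : List (String × Int))).get? c = none := rfl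
  rw [pvPrioIndex_eq]
  simp only [PySem.Dict.get?_mk_cons, pvIdx, pvPrio, apply_ite (Option.map (· + (1:Int))),
    Option.map_some, Option.map_none, hempty]
  norm_num

theorem pvOptMin_assoc (a b c : Option (Int × String)) :
    pvOptMin (pvOptMin a b) c = pvOptMin a (pvOptMin b c) := by
  rcases a with _|a
  · rfl
  rcases b with _|b
  · rfl
  rcases c with _|c
  · simp only [pvOptMin]
    split_ifs <;> rfl
  by_cases h1 : b.1 < a.1 <;> by_cases h2 : c.1 < b.1 <;>
    simp only [pvOptMin, h1, h2, if_true, if_false] <;> split_ifs <;> first | rfl | omega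

-- A's first loop builds pvCats
theorem pvA_cats (tags : List String) :
    tags.foldl (fun acc tag => if PySem.Str.isIn ":" tag then acc ++ [pvPrefix tag] else acc) [] =
      pvCats tags := by
  rw [PySem.List.foldl_append_if]; rfl

-- B's loop over tags is the fold of pvStep over pvCats
theorem pvB_fold (tags : List String) (st : Option String × Option (Int × String)) :
    tags.foldl
      (fun (st : Option String × Option (Int × String)) tag =>
        if PySem.Str.isIn ":" tag then
          let cat := pvPrefix tag
          let first := match st.1 with | none => some cat | some f => some f
          let best :=
            match pvPrioIndex.get? cat with
            | some i =>
                match st.2 with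
                | none => some (i, cat)
                | some b => if i < b.1 then some (i, cat) else some b
            | none => st.2
          (first, best)
        else st) st = (pvCats tags).foldl pvStep st := by
  induction tags generalizing st with
  | nil => rfl
  | cons t ts ih =>
    by_cases h : PySem.Str.isIn ":" t
    · simp only [List.foldl_cons, h, if_true, pvCats, List.filter_cons, List.map_cons, ih]
      congr 1
      simp only [pvStep]
      rcases st with ⟨_|f, b⟩ <;> rfl
    · simp only [List.foldl_cons, h, pvCats, List.filter_cons, ih]
      simp

theorem pvFold_fst (cats : List String) (st : Option String × Option (Int × String)) :
    (cats.foldl pvStep st).1 = st.1.or cats.head? := by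
  induction cats generalizing st with
  | nil => simp
  | cons c cs ih =>
    simp only [List.foldl_cons, ih, pvStep]
    rcases st with ⟨_|f, b⟩ <;> simp

theorem pvStep_snd (st : Option String × Option (Int × String)) (c : String) :
    (pvStep st c).2 = pvOptMin st.2 ((pvPrioIndex.get? c).map (fun i => (i, c))) := by
  simp only [pvStep]
  rcases h : pvPrioIndex.get? c with _|i <;> rcases st with ⟨f, _|b⟩ <;> simp [pvOptMin]

theorem pvFold_snd (cats : List String) (st : Option String × Option (Int × String)) :
    (cats.foldl pvStep st).2 = pvOptMin st.2 (pvMinOverP pvPrio cats) := by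
  induction cats generalizing st with
  | nil => rcases st with ⟨f, _|b⟩ <;> rfl
  | cons c cs ih =>
    simp only [List.foldl_cons, ih, pvMinOverP, ← pvOptMin_assoc]
    congr 1
    rw [pvStep_snd, pvPrioIndex_get?]

theorem pvIdx_nonneg (P : List String) (c : String) (i : Int) (h : pvIdx P c = some i) : 0 ≤ i := by
  induction P generalizing i with
  | nil => simp [pvIdx] at h
  | cons p rest ih =>
    simp only [pvIdx] at h
    split_ifs at h
    · simp only [Option.some.injEq] at h; omega
    · rcases hr : pvIdx rest c with _|j <;> rw [hr] at h <;> simp at h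
      have := ih j hr; omega

theorem pvMinOverP_nonneg (P cats : List String) (pr : Int × String)
    (h : pvMinOverP P cats = some pr) : 0 ≤ pr.1 := by
  induction cats generalizing pr with
  | nil => simp [pvMinOverP] at h
  | cons c cs ih =>
    simp only [pvMinOverP] at h
    rcases hg : pvIdx P c with _|i <;> rw [hg] at h
    · simp only [Option.map_none, pvOptMin] at h
      exact ih pr h
    · rcases hm : pvMinOverP P cs with _|pr' <;> rw [hm] at h <;>
        simp only [Option.map_some, pvOptMin] at h
      · cases h; exact pvIdx_nonneg P c i hg
      · have h1 := pvIdx_nonneg P c i hg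
        have h2 := ih pr' hm
        split_ifs at h <;> cases h <;> simp_all

def pvShift (pr : Int × String) : Int × String := (pr.1 + 1, pr.2)

theorem pvMinOverP_nil (cats : List String) : pvMinOverP [] cats = none := by
  induction cats with
  | nil => rfl
  | cons c cs ih => simp [pvMinOverP, pvIdx, pvOptMin, ih]

theorem pvOptMin_map_shift (a b : Option (Int × String)) :
    pvOptMin (a.map pvShift) (b.map pvShift) = (pvOptMin a b).map pvShift := by
  rcases a with _|a <;> rcases b with _|b <;> simp only [Option.map_none, Option.map_some, pvOptMin, pvShift]
  split_ifs <;> first | rfl | (exfalso; omega)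

theorem pvMinOverP_shift (p : String) (P cats : List String) (h : p ∉ cats) :
    pvMinOverP (p :: P) cats = (pvMinOverP P cats).map pvShift := by
  induction cats with
  | nil => rfl
  | cons c cs ih =>
    have hpc : (p == c) = false := by
      simp only [beq_eq_false_iff_ne]; rintro rfl; exact h (List.mem_cons_self ..)
    simp only [pvMinOverP, pvIdx, hpc, Bool.false_eq_true, if_false,
      ih (fun hm => h (List.mem_cons_of_mem _ hm))]
    rw [← pvOptMin_map_shift]
    congr 1
    rcases pvIdx P c with _|i <;> simp [pvShift]

theorem pvMinOverP_hit (p : String) (P cats : List String) (h : p ∈ cats) :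
    pvMinOverP (p :: P) cats = some (0, p) := by
  induction cats with
  | nil => cases h
  | cons c cs ih =>
    by_cases hpc : p = c
    · subst hpc
      simp only [pvMinOverP, pvIdx, BEq.rfl, if_true, Option.map_some]
      rcases hm : pvMinOverP (p :: P) cs with _|pr
      · rfl
      · have := pvMinOverP_nonneg _ _ _ hm
        simp only [pvOptMin]
        rw [if_neg (by omega)]
    · have hp : p ∈ cs := by rcases List.mem_cons.mp h with h' | h'; exact absurd h'.symm (Ne.symm hpc); exact h'
      have hpc' : (p == c) = false := by simp [hpc]
      simp only [pvMinOverP, ih hp, pvIdx, hpc', Bool.false_eq_true, if_false]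
      rcases hg : pvIdx P c with _|i
      · rfl
      · have := pvIdx_nonneg P c i hg
        simp only [Option.map_some, pvOptMin]
        rw [if_pos (by omega)]

-- the heart: 'first priority category occurring in cats' = 'category at the minimal priority index'
theorem pvMain (P cats : List String) :
    pvFindPrio P cats = (pvMinOverP P cats).map (·.2) := by
  induction P with
  | nil => simp [pvFindPrio, pvMinOverP_nil]
  | cons p P' ih =>
    by_cases hc : p ∈ cats
    · have hc' : cats.contains p = true := by simpa using hc
      simp only [pvFindPrio, hc', if_true, pvMinOverP_hit p P' cats hc, Option.map_some]
    · have hc' : cats.contains p = false := by simpa using hc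
      simp only [pvFindPrio, hc', Bool.false_eq_true, if_false, ih,
        pvMinOverP_shift p P' cats hc, Option.map_map]
      rfl

-- ===== VERDICT (by name: the statement is the Claim_ definition above) =====
theorem determine_primary_category_py_spec : Claim_equal_determine_primary_category_py := by
  intro tags _
  unfold Spec_determine_primary_category_py determine_primary_category_py determine_primary_category_py_alt
  by_cases h : tags = []
  · simp [h]
  · simp only [h, if_false]
    rw [pvA_cats, pvB_fold, pvFold_fst, pvFold_snd]
    have hmin : pvOptMin none (pvMinOverP pvPrio (pvCats tags)) = pvMinOverP pvPrio (pvCats tags) := rfl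
    rw [hmin, pvMain]
    rcases hm : pvMinOverP pvPrio (pvCats tags) with _|pr
    · simp only [Option.map_none, Option.or]
      rcases pvCats tags with _|⟨c, cs⟩ <;> rfl
    · rfl
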